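-- pv_equiv track=rewrite | github.com/pypi-data/pypi-mirror-399 | packages/glove80-keymap-visualizer/glove80_keymap_visualizer-0.6.0-py3-none-any.whl/glove80_visualizer/kle_template.py | _split_long_name
-- ===== SOURCE A (Python) =====
-- def _split_long_name(name: str, max_len: int = 5) -> tuple[str, str] | None:
--     """
--     Split a long name into two parts for display on two lines.
--
--     Returns None if the name fits on one line.
--     Returns (first_part, second_part) if split is needed.
--     Truncates if the name is too long even for two lines.
--     """
--     if len(name) <= max_len:
--         return None
--
--     # Try to split at CamelCase boundaries
--     # Find positions where lowercase is followed by uppercase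
--     split_points = []
--     for i in range(1, len(name)):
--         if name[i - 1].islower() and name[i].isupper():
--             split_points.append(i)
--
--     # Choose the best split point (closest to middle)
--     if split_points:
--         middle = len(name) // 2
--         best_split = min(split_points, key=lambda x: abs(x - middle))
--         first = name[:best_split]
--         second = name[best_split:]
--     else:
--         # No CamelCase boundary, split at middle
--         mid = len(name) // 2
--         first = name[:mid]
--         second = name[mid:]
--
--     # Truncate if parts are still too long (max 7 chars each for 2 lines)
--     max_part_len = 7
--     if len(first) > max_part_len:
--         first = first[: max_part_len - 1] + "…"
--     if len(second) > max_part_len: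
--         second = second[: max_part_len - 1] + "…"
--
--     return (first, second)
-- ===== SOURCE B (Python) =====
-- def _split_long_name(name: str, max_len: int = 5):
--     """Center-out probe for the CamelCase boundary nearest the middle (lower index wins ties)."""
--     if len(name) <= max_len:
--         return None
--     n = len(name)
--     mid = n // 2
--
--     def boundary(i):
--         return 1 <= i < n and name[i - 1].islower() and name[i].isupper()
--
--     best = None
--     for d in range(max(mid, n - mid)):
--         if boundary(mid - d):
--             best = mid - d
--         elif boundary(mid + d):
--             best = mid + d
--         if best is not None:
--             break
--     if best is None:
--         best = mid
--
--     first, second = name[:best], name[best:]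
--     if len(first) > 7:
--         first = first[:6] + "…"
--     if len(second) > 7:
--         second = second[:6] + "…"
--     return (first, second)
-- ===== Notes on version B (the rewrite author's own statement) =====
-- stated objective: alternative
-- what changed: A collects every CamelCase boundary index in a left-to-right pass and then takes the argmin of distance to the middle; B probes outward from the middle (mid-d before mid+d for d = 0,1,2,...) and returns the first boundary it hits, falling back to the midpoint, so the boundary list and the min pass disappear.
import Mathlib
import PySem

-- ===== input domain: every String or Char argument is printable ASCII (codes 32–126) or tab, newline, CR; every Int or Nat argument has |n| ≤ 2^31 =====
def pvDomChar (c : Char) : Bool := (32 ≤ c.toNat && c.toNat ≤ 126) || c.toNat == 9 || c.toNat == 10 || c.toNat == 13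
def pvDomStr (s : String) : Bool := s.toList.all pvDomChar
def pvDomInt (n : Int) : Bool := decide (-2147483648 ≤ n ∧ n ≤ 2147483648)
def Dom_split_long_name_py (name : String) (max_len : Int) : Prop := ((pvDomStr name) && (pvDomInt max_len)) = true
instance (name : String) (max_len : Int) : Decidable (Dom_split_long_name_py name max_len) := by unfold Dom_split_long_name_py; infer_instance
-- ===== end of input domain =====

-- B replaces A's collect-all-boundaries-then-argmin pass by a center-out probe that
-- returns the first CamelCase boundary found when stepping outward from the middle
-- (lower index first at each distance, matching A's tie-break); objective: alternative.

-- ===== PORT A =====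
-- name[i-1].islower() and name[i].isupper()  (indices known in range when used)
def pvPairOK (cs : List Char) (i : Int) : Bool :=
  match PySem.List.pyGet? cs (i - 1), PySem.List.pyGet? cs i with
  | some a, some b => PySem.Chars.islower a && PySem.Chars.isupper b
  | _, _ => false

def split_long_name_py (name : String) (max_len : Int) : Option (String × String) :=
  let cs := name.toList
  if (cs.length : Int) ≤ max_len then none
  else
    -- split_points = []; for i in range(1, len(name)): if …: split_points.append(i)
    -- (split_points inlined into the min? call below)
    let (first, second) :=
      match PySem.List.min?
          ((PySem.List.pyRange 1 (cs.length : Int) 1).foldl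
            (fun acc i => if pvPairOK cs i then acc ++ [i] else acc) [])
          (fun x => |x - PySem.Int.floordiv (cs.length : Int) 2|) with
      | some best => (PySem.List.slice cs none (some best), PySem.List.slice cs (some best) none)
      | none =>
        let mid := PySem.Int.floordiv (cs.length : Int) 2
        (PySem.List.slice cs none (some mid), PySem.List.slice cs (some mid) none)
    let max_part_len : Int := 7
    let first := if (first.length : Int) > max_part_len
      then PySem.List.slice first none (some (max_part_len - 1)) ++ ['…'] else first
    let second := if (second.length : Int) > max_part_len
      then PySem.List.slice second none (some (max_part_len - 1)) ++ ['…'] else second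
    some (String.ofList first, String.ofList second)

-- ===== PORT B =====
-- boundary(i) = 1 <= i < n and name[i-1].islower() and name[i].isupper()
def pvBoundary (cs : List Char) (i : Int) : Bool :=
  decide (1 ≤ i) && decide (i < (cs.length : Int)) && pvPairOK cs i

-- for d in range(F): if boundary(mid-d): … elif boundary(mid+d): …; break on hit
def pvProbe (cs : List Char) (mid : Int) : Nat → Int → Option Int
  | 0, _ => none
  | fuel + 1, d =>
    if pvBoundary cs (mid - d) then some (mid - d)
    else if pvBoundary cs (mid + d) then some (mid + d)
    else pvProbe cs mid fuel (d + 1)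

def split_long_name_py_alt (name : String) (max_len : Int) : Option (String × String) :=
  let cs := name.toList
  let n : Int := cs.length
  if n ≤ max_len then none
  else
    let mid := PySem.Int.floordiv n 2
    let best := (pvProbe cs mid (max mid (n - mid)).toNat 0).getD mid
    let first := PySem.List.slice cs none (some best)
    let second := PySem.List.slice cs (some best) none
    let first := if (first.length : Int) > 7
      then PySem.List.slice first none (some 6) ++ ['…'] else first
    let second := if (second.length : Int) > 7
      then PySem.List.slice second none (some 6) ++ ['…'] else second
    some (String.ofList first, String.ofList second)

-- ===== PRECONDITION & SPEC =====
def Spec_split_long_name_py (name : String) (max_len : Int) (out : Option (String × String)) : Prop := out = split_long_name_py_alt name max_len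
instance (name : String) (max_len : Int) (out : Option (String × String)) : Decidable (Spec_split_long_name_py name max_len out) := by unfold Spec_split_long_name_py; infer_instance

-- ===== CLAIM (what is proved, stated in full; the proofs are below) =====
def Claim_equal_split_long_name_py : Prop := ∀ (name : String) (max_len : Int), Dom_split_long_name_py name max_len → Spec_split_long_name_py name max_len (split_long_name_py name max_len)

-- ===== LEMMAS AND PROOFS =====

-- the value-level running minimum underlying Python's min(…, key=…)
def pvGMin (key : Int → Int) (t : List Int) (a : Int) : Int :=
  t.foldl (fun m x => if key x < key m then x else m) a

theorem pvMinCons (key : Int → Int) (a : Int) (t : List Int) :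
    PySem.List.min? (a :: t) key = some (pvGMin key t a) := by
  induction t generalizing a with
  | nil => rfl
  | cons x t ih =>
    have h1 : PySem.List.min? (a :: x :: t) key
        = PySem.List.min? ((if key x < key a then x else a) :: t) key := by
      simp only [PySem.List.min?, List.foldl]
      by_cases h : key x < key a <;> simp [h]
    rw [h1, ih]
    simp only [pvGMin, List.foldl]

theorem pvGMin_lt_or (key : Int → Int) (t : List Int) (a : Int) :
    pvGMin key t a = a ∨ key (pvGMin key t a) < key a := by
  induction t generalizing a with
  | nil => left; rfl
  | cons x t ih =>
    simp only [pvGMin, List.foldl] at *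
    by_cases h : key x < key a
    · simp only [if_pos h]
      rcases ih x with h1 | h1
      · rcases eq_or_ne x a with rfl | hne
        · left; exact h1
        · right; rw [h1]; exact h
      · right; exact lt_trans h1 h
    · simp only [if_neg h]; exact ih a

theorem pvGMin_first (key : Int → Int) (t : List Int) :
    ∀ a : Int, (∀ y ∈ t, a < y) → t.Pairwise (· < ·) →
    ∀ y, (y = a ∨ y ∈ t) → key y = key (pvGMin key t a) → pvGMin key t a ≤ y := by
  induction t with
  | nil =>
    intro a _ _ y hy _
    rcases hy with rfl | hy
    · exact le_refl _
    · simp at hy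
  | cons x t ih =>
    intro a ha hs y hy hk
    have hxt : ∀ z ∈ t, x < z := (List.pairwise_cons.mp hs).1
    have hst : t.Pairwise (· < ·) := (List.pairwise_cons.mp hs).2
    have hgm : pvGMin key (x :: t) a = pvGMin key t (if key x < key a then x else a) := rfl
    by_cases h : key x < key a
    · rw [hgm, if_pos h] at hk ⊢
      rcases hy with rfl | hy2
      · exfalso
        rcases pvGMin_lt_or key t x with h1 | h1
        · rw [h1] at hk; omega
        · omega
      · rw [List.mem_cons] at hy2
        rcases hy2 with rfl | hy3
        · exact ih _ hxt hst y (Or.inl rfl) hk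
        · exact ih _ hxt hst y (Or.inr hy3) hk
    · rw [hgm, if_neg h] at hk ⊢
      rcases hy with rfl | hy2
      · exact ih _ (fun z hz => ha z (List.mem_cons_of_mem x hz)) hst y (Or.inl rfl) hk
      · rw [List.mem_cons] at hy2
        rcases hy2 with hyx | hy3
        · -- y = x, dropped because key a ≤ key x
          rcases pvGMin_lt_or key t a with h1 | h1
          · rw [h1, hyx]; exact le_of_lt (ha x (List.mem_cons_self ..))
          · exfalso
            have h2 : key y = key x := by rw [hyx]
            omega
        · exact ih _ (fun z hz => ha z (List.mem_cons_of_mem x hz)) hst y (Or.inr hy3) hk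

theorem pvMinFirst (l : List Int) (key : Int → Int) (m : Int)
    (hs : l.Pairwise (· < ·)) (h : PySem.List.min? l key = some m) :
    ∀ y ∈ l, key y = key m → m ≤ y := by
  cases l with
  | nil => simp [PySem.List.min?] at h
  | cons a t =>
    rw [pvMinCons] at h
    obtain rfl : pvGMin key t a = m := Option.some.inj h
    intro y hy hk
    rw [List.mem_cons] at hy
    exact pvGMin_first key t a
      (fun z hz => (List.pairwise_cons.mp hs).1 z hz)
      (List.pairwise_cons.mp hs).2 y hy hk

theorem pvProbeNone (cs : List Char) (mid : Int)
    (h : ∀ i, pvBoundary cs i = false) :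
    ∀ (fuel : Nat) (d : Int), pvProbe cs mid fuel d = none := by
  intro fuel
  induction fuel with
  | zero => intro d; rfl
  | succ f ih => intro d; simp [pvProbe, h, ih]

theorem pvProbeSome (cs : List Char) (mid : Int) (d0 m : Int)
    (hm : pvBoundary cs m = true) (hkey : |m - mid| = d0)
    (hmin : ∀ i, pvBoundary cs i = true → d0 ≤ |i - mid|)
    (htb : pvBoundary cs (mid - d0) = true → m = mid - d0) :
    ∀ (fuel : Nat) (d : Int), 0 ≤ d → d ≤ d0 → d0 < d + fuel →
      pvProbe cs mid fuel d = some m := by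
  have hd00 : 0 ≤ d0 := hkey ▸ abs_nonneg _
  have hmcase : m - mid = d0 ∨ m - mid = -d0 := (abs_eq hd00).mp hkey
  intro fuel
  induction fuel with
  | zero => intro d _ _ hf; omega
  | succ f ih =>
    intro d hd0 hdle hf
    have e1 : |mid - d - mid| = d := by
      rw [show mid - d - mid = -d by ring, abs_neg, abs_of_nonneg hd0]
    have e2 : |mid + d - mid| = d := by
      rw [show mid + d - mid = d by ring, abs_of_nonneg hd0]
    by_cases h1 : pvBoundary cs (mid - d) = true
    · have hdd := hmin _ h1
      rw [e1] at hdd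
      have hdeq : d = d0 := le_antisymm hdle hdd
      subst hdeq
      have := htb h1
      simp [pvProbe, h1, this]
    · by_cases h2 : pvBoundary cs (mid + d) = true
      · have hdd := hmin _ h2
        rw [e2] at hdd
        have hdeq : d = d0 := le_antisymm hdle hdd
        subst hdeq
        rcases hmcase with hmc | hmc
        · have hmeq : m = mid + d := by omega
          simp [pvProbe, h1, h2, hmeq]
        · have hmeq : m = mid - d := by omega
          rw [hmeq] at hm
          exact absurd hm h1
      · have hdlt : d < d0 := by
          rcases lt_or_eq_of_le hdle with h | h
          · exact h
          · exfalso
            subst h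
            rcases hmcase with hmc | hmc
            · have hmeq : m = mid + d := by omega
              rw [hmeq] at hm; exact h2 hm
            · have hmeq : m = mid - d := by omega
              rw [hmeq] at hm; exact h1 hm
        simp only [pvProbe, h1, h2, if_neg, Bool.false_eq_true, not_false_iff]
        exact ih (d + 1) (by omega) (by omega) (by omega)

-- membership in A's split-point list is exactly pvBoundary
theorem pvMemFilter (cs : List Char) (i : Int) :
    i ∈ (PySem.List.pyRange 1 (cs.length : Int) 1).filter (pvBoundary cs)
      ↔ pvBoundary cs i = true := by
  constructor
  · intro h; exact (List.mem_filter.mp h).2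
  · intro h
    refine List.mem_filter.mpr ⟨?_, h⟩
    have h1 : (1 ≤ i ∧ i < (cs.length : Int)) := by
      unfold pvBoundary at h
      simp only [Bool.and_eq_true, decide_eq_true_eq] at h
      exact ⟨h.1.1, h.1.2⟩
    exact PySem.List.mem_pyRange_one.mpr h1

theorem pvFilterEq (cs : List Char) :
    (PySem.List.pyRange 1 (cs.length : Int) 1).filter (pvPairOK cs)
      = (PySem.List.pyRange 1 (cs.length : Int) 1).filter (pvBoundary cs) := by
  apply List.filter_congr
  intro i hi
  have h := PySem.List.mem_pyRange_one.mp hi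
  unfold pvBoundary
  simp [h.1, h.2]

-- the center-out probe computes exactly Python's min(split_points, key=|·-mid|)
theorem pvCore (cs : List Char) (n mid : Int) (hn : n = (cs.length : Int))
    (hm0 : 0 ≤ mid) (hmn : mid ≤ n) :
    pvProbe cs mid (max mid (n - mid)).toNat 0
      = PySem.List.min? ((PySem.List.pyRange 1 n 1).filter (pvBoundary cs))
          (fun x => |x - mid|) := by
  subst hn
  set l := (PySem.List.pyRange 1 (cs.length : Int) 1).filter (pvBoundary cs) with hl
  rcases hcase : PySem.List.min? l (fun x => |x - mid|) with _ | m
  · -- no boundary at all: probe exhausts its range and returns none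
    have hnil : l = [] := (PySem.List.min?_eq_none_iff _ _).mp hcase
    have hb : ∀ i, pvBoundary cs i = false := by
      intro i
      by_contra h
      have : i ∈ l := (pvMemFilter cs i).mpr (by revert h; cases pvBoundary cs i <;> simp)
      rw [hnil] at this; simp at this
    exact pvProbeNone cs mid hb _ _
  · have hmem : m ∈ l := PySem.List.min?_mem hcase
    have hmb : pvBoundary cs m = true := (pvMemFilter cs m).mp hmem
    have hrange : 1 ≤ m ∧ m < (cs.length : Int) := by
      unfold pvBoundary at hmb
      simp only [Bool.and_eq_true, decide_eq_true_eq] at hmb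
      exact ⟨hmb.1.1, hmb.1.2⟩
    have hmin : ∀ i, pvBoundary cs i = true → |m - mid| ≤ |i - mid| := by
      intro i hi
      exact PySem.List.min?_isMin hcase i ((pvMemFilter cs i).mpr hi)
    have hsorted : l.Pairwise (· < ·) :=
      List.Pairwise.sublist List.filter_sublist
        (PySem.List.pairwise_lt_pyRange_one 1 (cs.length : Int))
    have hd00 : (0 : Int) ≤ |m - mid| := abs_nonneg _
    have hmcase : m - mid = |m - mid| ∨ m - mid = -|m - mid| := (abs_eq hd00).mp rfl
    have htb : pvBoundary cs (mid - |m - mid|) = true → m = mid - |m - mid| := by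
      intro h
      have hmem2 : (mid - |m - mid|) ∈ l := (pvMemFilter cs _).mpr h
      have hk : |mid - |m - mid| - mid| = |m - mid| := by
        rw [show mid - |m - mid| - mid = -|m - mid| by ring, abs_neg, abs_of_nonneg hd00]
      have hle := pvMinFirst l (fun x => |x - mid|) m hsorted hcase _ hmem2 hk
      rcases hmcase with hmc | hmc <;> omega
    apply pvProbeSome cs mid (|m - mid|) m hmb rfl hmin htb
    · exact le_refl 0
    · exact hd00
    · have hfz : (0 : Int) ≤ max mid ((cs.length : Int) - mid) :=
        le_trans hm0 (le_max_left _ _)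
      have hcast : ((max mid ((cs.length : Int) - mid)).toNat : Int)
          = max mid ((cs.length : Int) - mid) := Int.toNat_of_nonneg hfz
      rw [hcast]
      have hmx1 : mid ≤ max mid ((cs.length : Int) - mid) := le_max_left _ _
      have hmx2 : (cs.length : Int) - mid ≤ max mid ((cs.length : Int) - mid) :=
        le_max_right _ _
      rcases hmcase with hmc | hmc <;> omega

-- ===== VERDICT (by name: the statement is the Claim_ definition above) =====
theorem split_long_name_py_spec : Claim_equal_split_long_name_py := by
  intro name max_len _
  unfold Spec_split_long_name_py split_long_name_py split_long_name_py_alt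
  by_cases hlen : ((name.toList.length : Int) ≤ max_len)
  · rw [if_pos hlen, if_pos hlen]
  · rw [if_neg hlen, if_neg hlen]
    have hfd : PySem.Int.floordiv (name.toList.length : Int) 2
        = (name.toList.length : Int) / 2 :=
      Int.fdiv_eq_ediv_of_nonneg _ (by positivity)
    rw [PySem.List.foldl_append_if_eq_filter (pvPairOK name.toList)
          (PySem.List.pyRange 1 (name.toList.length : Int) 1) [],
        List.nil_append, pvFilterEq name.toList,
        ← pvCore name.toList (name.toList.length : Int)
          (PySem.Int.floordiv (name.toList.length : Int) 2) rfl
          (by rw [hfd]; positivity) (by rw [hfd]; omega)]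
    simp only [String.length_toList]
    rcases hp : pvProbe name.toList ((name.length : Int) / 2)
        (max ((name.length : Int) / 2) ((name.length : Int) - (name.length : Int) / 2)).toNat
        0 with _ | best
    · simp [hp]
    · simp [hp]
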